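-- pv_equiv track=rewrite | github.com/robert-purcaru/School | First_Year/ESC180/Exams/exam_practicy.py | largest_col_sum
-- ===== SOURCE A (Python) =====
-- def largest_col_sum(M):
--     largest_sum = -1000000
--     for i in range(len(M[0])):
--         sum = 0
--         for j in range(len(M)):
--             sum = sum + M[j][i]
--             if sum > largest_sum:
--                 largest_sum = sum
--
--     return largest_sum
-- ===== SOURCE B (Python) =====
-- def largest_col_sum(M):
--     n = len(M[0])
--     col_sums = [0] * n
--     largest = -1000000
--     for row in M:
--         for i in range(n):
--             col_sums[i] += row[i]
--             if col_sums[i] > largest: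
--                 largest = col_sums[i]
--     return largest
-- ===== Notes on version B (the rewrite author's own statement) =====
-- stated objective: alternative
-- what changed: B traverses the matrix row-major with an explicit per-column running-sum array and one global maximum, instead of A's column-major nested loops recomputing each column prefix sum in an inner pass; the same partial sums are met in transposed order.
import Mathlib
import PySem

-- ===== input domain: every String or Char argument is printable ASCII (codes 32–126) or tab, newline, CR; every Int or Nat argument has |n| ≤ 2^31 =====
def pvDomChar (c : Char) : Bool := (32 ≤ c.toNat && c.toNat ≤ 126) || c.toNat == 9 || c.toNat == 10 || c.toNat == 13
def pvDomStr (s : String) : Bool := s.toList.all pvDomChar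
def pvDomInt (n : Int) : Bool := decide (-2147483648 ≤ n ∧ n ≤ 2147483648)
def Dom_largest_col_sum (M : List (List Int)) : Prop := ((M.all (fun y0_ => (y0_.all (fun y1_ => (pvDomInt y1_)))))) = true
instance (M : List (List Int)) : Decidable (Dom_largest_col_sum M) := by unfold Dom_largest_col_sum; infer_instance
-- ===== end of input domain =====

-- B replaces A's column-major nested loops by a single row-major pass keeping a per-column
-- running-sum array and one global maximum (objective: alternative decomposition, same cost).

-- ===== PORT A =====
-- On Pre_ inputs M ≠ [] and every row is at least as long as M[0], so M[0] is ported as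
-- M.headD [] and M[j][i] as (row).getD i 0 — exact on the admitted inputs.
def largest_col_sum (M : List (List Int)) : Int :=
  (List.range (M.headD []).length).foldl
    (fun largest i =>
      (M.foldl (fun (p : Int × Int) row =>
          let s := p.1 + row.getD i 0
          (s, if s > p.2 then s else p.2)) ((0 : Int), largest)).2)
    (-1000000)

-- ===== PORT B =====
def largest_col_sum_alt (M : List (List Int)) : Int :=
  let n := (M.headD []).length
  (M.foldl
    (fun (p : List Int × Int) row =>
      (List.range n).foldl
        (fun (q : List Int × Int) i =>
          let v := q.1.getD i 0 + row.getD i 0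
          (q.1.set i v, if v > q.2 then v else q.2)) p)
    (List.replicate n (0 : Int), (-1000000 : Int))).2

-- ===== PRECONDITION & SPEC =====
-- Pre_ excludes exactly the inputs where the Python A raises: the empty matrix (M[0] is an
-- IndexError) and ragged matrices with a row shorter than the first row (M[j][i] IndexError).
def Pre_largest_col_sum (M : List (List Int)) : Prop :=
  M ≠ [] ∧ ∀ row ∈ M, (M.headD []).length ≤ row.length

instance (M : List (List Int)) : Decidable (Pre_largest_col_sum M) := by
  unfold Pre_largest_col_sum; infer_instance

def pvWitness_largest_col_sum : List (List Int) := [[1, -2], [3, 4]]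

def Spec_largest_col_sum (M : List (List Int)) (out : Int) : Prop := out = largest_col_sum_alt M
instance (M : List (List Int)) (out : Int) : Decidable (Spec_largest_col_sum M out) := by
  unfold Spec_largest_col_sum; infer_instance

-- ===== CLAIM (what is proved, stated in full; the proofs are below) =====
def Claim_equal_largest_col_sum : Prop :=
  ∀ (M : List (List Int)), Dom_largest_col_sum M → Pre_largest_col_sum M →
    Spec_largest_col_sum M (largest_col_sum M)

-- ===== LEMMAS AND PROOFS =====

-- `F M i j` = prefix sum of column i over the first j+1 rows; both programs maximise these.
def pvColF (M : List (List Int)) (i j : Nat) : Int :=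
  (((M.map (fun r => r.getD i 0)).take (j + 1)).sum)

-- running prefix sums of a list, starting from c
def pvPfx : Int → List Int → List Int
  | _, [] => []
  | c, x :: xs => (c + x) :: pvPfx (c + x) xs

-- per-column running sums updated by one row
def pvUpd (cs r : List Int) : List Int :=
  (List.range cs.length).map (fun i => cs.getD i 0 + r.getD i 0)

-- row-by-row sequence of column-sum arrays
def pvPfxRows : List Int → List (List Int) → List (List Int)
  | _, [] => []
  | cs, r :: rs => pvUpd cs r :: pvPfxRows (pvUpd cs r) rs

theorem pv_if_max (s l : Int) : (if s > l then s else l) = max l s := by omega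

-- ----- A side -----

theorem pvA_inner (xs : List Int) : ∀ (c l : Int),
    (xs.foldl (fun (p : Int × Int) x =>
        let s := p.1 + x
        (s, if s > p.2 then s else p.2)) (c, l)).2
      = (pvPfx c xs).foldl max l := by
  induction xs with
  | nil => intro c l; simp [pvPfx]
  | cons x xs ih =>
    intro c l
    rw [List.foldl_cons]
    have step : (let s := (c, l).1 + x;
        ((s : Int), if s > (c, l).2 then s else (c, l).2))
        = ((c + x : Int), max l (c + x)) := by
      simp [pv_if_max]
    rw [step]
    simpa [pvPfx] using ih (c + x) (max l (c + x))

theorem pvPfx_eq_map (xs : List Int) : ∀ (c : Int),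
    pvPfx c xs = (List.range xs.length).map (fun j => c + ((xs.take (j + 1)).sum)) := by
  induction xs with
  | nil => intro c; simp [pvPfx]
  | cons x xs ih =>
    intro c
    simp only [pvPfx, ih (c + x), List.length_cons, List.range_succ_eq_map, List.map_cons,
      List.map_map, List.cons.injEq]
    refine ⟨by simp, ?_⟩
    apply List.map_congr_left
    intro j _
    simp [List.take_succ_cons, add_assoc, Nat.succ_eq_add_one]

theorem pvA_char (M : List (List Int)) :
    largest_col_sum M =
      List.foldl max (-1000000)
        (((List.range (M.headD []).length).map
            (fun i => (List.range M.length).map (fun j => pvColF M i j))).flatten) := by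
  unfold largest_col_sum
  rw [List.foldl_flatten, List.foldl_map]
  apply PySem.List.foldl_congr_mem
  intro acc i _
  have h1 : (M.foldl (fun (p : Int × Int) row =>
      let s := p.1 + row.getD i 0
      (s, if s > p.2 then s else p.2)) ((0 : Int), acc)).2
      = ((M.map (fun r => r.getD i 0)).foldl (fun (p : Int × Int) x =>
          let s := p.1 + x
          (s, if s > p.2 then s else p.2)) ((0 : Int), acc)).2 := by
    rw [List.foldl_map]
  rw [h1, pvA_inner, pvPfx_eq_map]
  simp [pvColF]

-- ----- B side -----

theorem pv_rowfold (row : List Int) (is : List Nat) : ∀ (cs : List Int) (l : Int), is.Nodup →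
    is.foldl (fun (q : List Int × Int) i =>
        let v := q.1.getD i 0 + row.getD i 0
        (q.1.set i v, if v > q.2 then v else q.2)) (cs, l)
      = (is.foldl (fun c i => c.set i (cs.getD i 0 + row.getD i 0)) cs,
         is.foldl (fun a i => max a (cs.getD i 0 + row.getD i 0)) l) := by
  induction is with
  | nil => intro cs l _; simp
  | cons i t ih =>
    intro cs l hnd
    have hit : i ∉ t := (List.nodup_cons.mp hnd).1
    have hnd' : t.Nodup := (List.nodup_cons.mp hnd).2
    have step : (let v := (cs, l).1.getD i 0 + row.getD i 0;
        ((cs, l).1.set i v, if v > (cs, l).2 then v else (cs, l).2))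
        = (cs.set i (cs.getD i 0 + row.getD i 0), max l (cs.getD i 0 + row.getD i 0)) := by
      simp [pv_if_max]
    have hread : ∀ i' ∈ t, (cs.set i (cs.getD i 0 + row.getD i 0)).getD i' 0 = cs.getD i' 0 := by
      intro i' hi'
      have : i ≠ i' := fun h => hit (h ▸ hi')
      simp [List.getD_eq_getElem?_getD, List.getElem?_set_ne this]
    rw [List.foldl_cons, step,
      ih (cs.set i (cs.getD i 0 + row.getD i 0)) (max l (cs.getD i 0 + row.getD i 0)) hnd']
    simp only [Prod.mk.injEq]
    constructor
    · apply PySem.List.foldl_congr_mem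
      intro c i' hi'
      rw [hread i' hi']
    · apply PySem.List.foldl_congr_mem
      intro a i' hi'
      rw [hread i' hi']

theorem pv_setfold_length (g : Nat → Int) (is : List Nat) : ∀ (cs : List Int),
    (is.foldl (fun c i => c.set i (g i)) cs).length = cs.length := by
  induction is with
  | nil => intro cs; rfl
  | cons i t ih => intro cs; simp [List.foldl_cons, ih, List.length_set]

theorem pv_setfold_getD (g : Nat → Int) (is : List Nat) : ∀ (cs : List Int) (k : Nat),
    (∀ i ∈ is, i < cs.length) →
    (is.foldl (fun c i => c.set i (g i)) cs).getD k 0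
      = if k ∈ is then g k else cs.getD k 0 := by
  induction is with
  | nil => intro cs k _; simp
  | cons i t ih =>
    intro cs k hb
    have hi : i < cs.length := hb i (by simp)
    have hb' : ∀ i' ∈ t, i' < (cs.set i (g i)).length := by
      intro i' hi'; simpa [List.length_set] using hb i' (by simp [hi'])
    simp only [List.foldl_cons]
    rw [ih (cs.set i (g i)) k hb']
    by_cases hkt : k ∈ t
    · simp [hkt]
    · by_cases hki : k = i
      · subst hki
        simp [hkt, List.getD_eq_getElem?_getD, hi]
      · have : i ≠ k := fun h => hki h.symm
        simp [hkt, hki, List.getD_eq_getElem?_getD, List.getElem?_set_ne this]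

theorem pv_setfold_range_eq_upd (cs r : List Int) :
    (List.range cs.length).foldl (fun c i => c.set i (cs.getD i 0 + r.getD i 0)) cs
      = pvUpd cs r := by
  apply List.ext_getElem
  · simp [pv_setfold_length, pvUpd]
  · intro k h1 h2
    have hk : k < cs.length := by simpa [pv_setfold_length] using h1
    have hbd : ∀ i ∈ List.range cs.length, i < cs.length := by simp
    have := pv_setfold_getD (fun i => cs.getD i 0 + r.getD i 0) (List.range cs.length) cs k hbd
    rw [List.getD_eq_getElem _ 0 h1] at this
    simp only [List.mem_range, hk, if_pos] at this
    have h3 : (pvUpd cs r)[k]'h2 = cs.getD k 0 + r.getD k 0 := by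
      simp [pvUpd, List.getD_eq_getElem?_getD]
    rw [this, h3]

theorem pv_upd_length (cs r : List Int) : (pvUpd cs r).length = cs.length := by
  simp [pvUpd]

theorem pv_upd_getD (cs r : List Int) (i : Nat) (h : i < cs.length) :
    (pvUpd cs r).getD i 0 = cs.getD i 0 + r.getD i 0 := by
  simp [pvUpd, List.getD_eq_getElem?_getD, h]

theorem pvB_fold (n : Nat) (rs : List (List Int)) : ∀ (cs : List Int) (l : Int),
    cs.length = n →
    (rs.foldl
        (fun (p : List Int × Int) row =>
          (List.range n).foldl
            (fun (q : List Int × Int) i =>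
              let v := q.1.getD i 0 + row.getD i 0
              (q.1.set i v, if v > q.2 then v else q.2)) p) (cs, l)).2
      = List.foldl max l (pvPfxRows cs rs).flatten := by
  induction rs with
  | nil => intro cs l _; simp [pvPfxRows]
  | cons r rs ih =>
    intro cs l hlen
    simp only [List.foldl_cons]
    rw [pv_rowfold r (List.range n) cs l (List.nodup_range)]
    subst hlen
    rw [pv_setfold_range_eq_upd cs r]
    have hmax : (List.range cs.length).foldl (fun a i => max a (cs.getD i 0 + r.getD i 0)) l
        = List.foldl max l (pvUpd cs r) := by
      rw [pvUpd, List.foldl_map]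
    rw [hmax, ih (pvUpd cs r) _ (pv_upd_length cs r)]
    simp [pvPfxRows, List.foldl_append]

theorem pvPfxRows_eq_map (rs : List (List Int)) : ∀ (cs : List Int),
    pvPfxRows cs rs
      = (List.range rs.length).map (fun j =>
          (List.range cs.length).map (fun i =>
            cs.getD i 0 + ((rs.map (fun r => r.getD i 0)).take (j + 1)).sum)) := by
  induction rs with
  | nil => intro cs; simp [pvPfxRows]
  | cons r rs ih =>
    intro cs
    simp only [pvPfxRows, ih (pvUpd cs r), pv_upd_length, List.length_cons,
      List.range_succ_eq_map, List.map_cons, List.map_map, List.cons.injEq]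
    constructor
    · apply List.map_congr_left
      intro i hi
      simp [List.mem_range] at hi
      simp [List.getD_eq_getElem?_getD, hi]
    · apply List.map_congr_left
      intro j _
      apply List.map_congr_left
      intro i hi
      simp [List.mem_range] at hi
      rw [pv_upd_getD cs r i hi]
      simp [Nat.succ_eq_add_one, List.take_succ_cons, add_assoc]

theorem pvB_char (M : List (List Int)) :
    largest_col_sum_alt M =
      List.foldl max (-1000000)
        (((List.range M.length).map
            (fun j => (List.range (M.headD []).length).map (fun i => pvColF M i j))).flatten) := by
  unfold largest_col_sum_alt
  simp only []
  rw [pvB_fold (M.headD []).length M (List.replicate (M.headD []).length 0) (-1000000)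
      (List.length_replicate)]
  rw [pvPfxRows_eq_map]
  congr 1
  congr 1
  simp only [List.length_replicate]
  apply List.map_congr_left
  intro j _
  apply List.map_congr_left
  intro i _
  have : (List.replicate (M.headD []).length (0 : Int)).getD i 0 = 0 := by
    simp [List.getD_eq_getElem?_getD, List.getElem?_replicate]
    split <;> simp
  rw [this, pvColF]
  ring

-- ----- transposition: the two flattened lists are permutations of each other -----

theorem pv_transpose_perm (n m : Nat) (f : Nat → Nat → Int) :
    (((List.range n).map (fun i => (List.range m).map (fun j => f i j))).flatten).Perm
      (((List.range m).map (fun j => (List.range n).map (fun i => f i j))).flatten) := by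
  rw [← Multiset.coe_eq_coe]
  have h : ∀ (a b : Nat) (g : Nat → Nat → Int),
      ((((List.range a).map (fun i => (List.range b).map (fun j => g i j))).flatten : List Int)
        : Multiset Int)
      = ((List.range a : List Nat) : Multiset Nat).bind
          (fun i => ((List.range b : List Nat) : Multiset Nat).bind (fun j => {g i j})) := by
    intro a b g
    rw [← List.flatMap_def, ← Multiset.coe_bind]
    congr 1
    funext i
    rw [← Multiset.map_coe, Multiset.bind_singleton]
  rw [h n m f, h m n (fun j i => f i j), Multiset.bind_bind]

-- ===== VERDICT (by name: the statement is the Claim_ definition above) =====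
theorem largest_col_sum_spec : Claim_equal_largest_col_sum := by
  intro M _ _
  unfold Spec_largest_col_sum
  rw [pvA_char, pvB_char]
  have h := (List.Perm.foldl_eq (f := fun (a b : Int) => max a b)
    (pv_transpose_perm (M.headD []).length M.length (fun i j => pvColF M i j))
    (-1000000))
  exact h
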